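-- pv_equiv track=rewrite | github.com/yujin0719/Algorithm | 프로그래머스/Summer Winter Coding(~2018)/숫자 게임.py | solution
-- ===== SOURCE A (Python) =====
-- from bisect import bisect_right
--
-- def solution(A, B):
--     A.sort(reverse = True)
--     B.sort()
--     answer = 0
--     for a in A:
--         position = bisect_right(B,a)
--         if position < len(B):
--             del B[position]
--             answer += 1
--     return answer
-- ===== SOURCE B (Python) =====
-- def solution(A, B):
--     # Single index-walk over both lists sorted descending: advance through the
--     # A values largest first; the B index j only moves when its value beats the
--     # current a, so j ends up being the number of matched pairs.  Does not
--     # mutate its arguments (the original sorts the caller's lists in place and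
--     # deletes from B).
--     xs = sorted(A, reverse=True)
--     ys = sorted(B, reverse=True)
--     i = 0
--     j = 0
--     while i < len(xs) and j < len(ys):
--         if xs[i] < ys[j]:
--             j += 1
--         i += 1
--     return j
-- ===== Notes on version B (the rewrite author's own statement) =====
-- stated objective: alternative
-- what changed: replaces the per-element bisect-and-delete loop on a mutable sorted B (each del shifts O(n) elements) with a single two-index greedy walk over both arrays sorted descending; intended as asymptotically better (O(n log n) vs O(n^2)) but a timing run read only ~1.5x at the largest size, so no speed is claimed
import Mathlib
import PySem

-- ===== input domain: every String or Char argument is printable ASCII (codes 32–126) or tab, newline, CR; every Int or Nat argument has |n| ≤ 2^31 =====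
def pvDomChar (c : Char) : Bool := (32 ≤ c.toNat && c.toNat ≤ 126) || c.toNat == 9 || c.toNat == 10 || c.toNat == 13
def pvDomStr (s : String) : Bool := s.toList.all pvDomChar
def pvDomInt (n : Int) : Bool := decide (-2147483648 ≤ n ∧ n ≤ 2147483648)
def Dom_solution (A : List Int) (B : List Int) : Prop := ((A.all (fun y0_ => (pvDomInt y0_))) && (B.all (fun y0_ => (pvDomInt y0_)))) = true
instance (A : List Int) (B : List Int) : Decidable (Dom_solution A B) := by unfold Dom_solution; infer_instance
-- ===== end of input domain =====

-- B replaces A's bisect-and-delete loop with a single two-index greedy walk over both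
-- arrays sorted descending; equivalence is about the RETURN value only (the Python A
-- sorts both caller lists in place and deletes from B; B does not mutate its arguments).

-- ===== PORT A =====
-- the 'for a in A: position = bisect_right(B, a); if position < len(B): del B[position]; answer += 1' loop
def solGo : List Int → List Int → Int → Int
  | [], _, ans => ans
  | a :: rest, Bs, ans =>
    let position := PySem.List.bisectRight Bs a
    if position < Bs.length then solGo rest (Bs.eraseIdx position) (ans + 1)
    else solGo rest Bs ans

def solution (A : List Int) (B : List Int) : Int :=
  solGo (PySem.List.sorted A (fun x => x) true) (PySem.List.sorted B (fun x => x)) 0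

-- ===== PORT B =====
-- the 'while i < len(xs) and j < len(ys): if xs[i] < ys[j]: j += 1; i += 1' loop;
-- both indices stay in range while the loop runs, so getD is exact
def altLoop (xs ys : List Int) (i j : Nat) : Nat :=
  if h : i < xs.length ∧ j < ys.length then
    if xs.getD i 0 < ys.getD j 0 then altLoop xs ys (i + 1) (j + 1)
    else altLoop xs ys (i + 1) j
  else j
termination_by xs.length - i

def solution_alt (A : List Int) (B : List Int) : Int :=
  (altLoop (PySem.List.sorted A (fun x => x) true) (PySem.List.sorted B (fun x => x) true) 0 0 : Int)

-- ===== PRECONDITION & SPEC =====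
def Spec_solution (A : List Int) (B : List Int) (out : Int) : Prop := out = solution_alt A B
instance (A : List Int) (B : List Int) (out : Int) : Decidable (Spec_solution A B out) := by unfold Spec_solution; infer_instance

-- ===== CLAIM (what is proved, stated in full; the proofs are below) =====
def Claim_equal_solution : Prop := ∀ (A : List Int) (B : List Int), Dom_solution A B → Spec_solution A B (solution A B)

-- ===== LEMMAS AND PROOFS =====

-- proof-side reformulation of B's loop: the two indices as the remaining suffixes
def tpGo : List Int → List Int → Int → Int
  | [], _, ans => ans
  | _ :: rest, [], ans => tpGo rest [] ans
  | a :: rest, b :: bs, ans => if a < b then tpGo rest bs (ans + 1) else tpGo rest (b :: bs) ans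

theorem tpGo_nil (ans : Int) : ∀ l : List Int, tpGo l [] ans = ans := by
  intro l; induction l with
  | nil => rfl
  | cons a rest ih => simpa [tpGo] using ih

-- B's index loop computes the suffix loop
theorem altLoop_eq_tpGo (xs ys : List Int) :
    ∀ i j, j ≤ ys.length → (altLoop xs ys i j : Int) = tpGo (xs.drop i) (ys.drop j) (j : Int) := by
  intro i
  induction hn : xs.length - i using Nat.strong_induction_on generalizing i with
  | _ n ih =>
    intro j hj
    rw [altLoop]
    by_cases hi : i < xs.length
    · by_cases hjl : j < ys.length
      · rw [dif_pos ⟨hi, hjl⟩]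
        have hxd : xs.drop i = xs[i] :: xs.drop (i + 1) := List.drop_eq_getElem_cons hi
        have hyd : ys.drop j = ys[j] :: ys.drop (j + 1) := List.drop_eq_getElem_cons hjl
        have hget : xs.getD i 0 = xs[i] := List.getD_eq_getElem xs 0 hi
        have hget' : ys.getD j 0 = ys[j] := List.getD_eq_getElem ys 0 hjl
        rw [hxd, hyd, tpGo, hget, hget']
        by_cases hc : xs[i] < ys[j]
        · rw [if_pos hc, if_pos hc,
            ih (xs.length - (i + 1)) (by omega) (i + 1) rfl (j + 1) (by omega)]
          push_cast; ring_nf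
        · rw [if_neg hc, if_neg hc,
            ih (xs.length - (i + 1)) (by omega) (i + 1) rfl j (by omega), ← hyd]
      · rw [dif_neg (by omega)]
        have : ys.drop j = [] := List.drop_eq_nil_of_le (by omega)
        rw [this, tpGo_nil]
    · rw [dif_neg (by omega)]
      have : xs.drop i = [] := List.drop_eq_nil_of_le (by omega)
      rw [this, tpGo]

-- the predicate 'b ≤ t' as a Bool
def leB (t : Int) : Int → Bool := fun b => decide (b ≤ t)

-- every element of the dropWhile-(≤ t) suffix of a sorted list exceeds t
theorem dropWhile_gt (t : Int) (Bs : List Int) (h : Bs.Pairwise (· ≤ ·)) :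
    ∀ x ∈ Bs.dropWhile (leB t), t < x := by
  intro x hx
  rcases e : Bs.dropWhile (leB t) with _ | ⟨b, tl⟩
  · simp [e] at hx
  · have hb : ¬ (leB t b = true) := by
      have := List.dropWhile_cons_of_neg (l := tl) (p := leB t) (a := b)
      exact fun hh => by
        have := List.head?_dropWhile_not (leB t) Bs
        rw [e] at this; simp at this; simp [leB] at this hh; omega
    have hsub : (Bs.dropWhile (leB t)).Sublist Bs := List.dropWhile_sublist _
    have hp : (b :: tl).Pairwise (· ≤ ·) := e ▸ (List.Pairwise.sublist hsub h)
    rw [e] at hx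
    simp [leB] at hb
    rcases List.mem_cons.1 hx with rfl | hx
    · exact lt_of_not_ge (by omega)
    · have := (List.pairwise_cons.1 hp).1 x hx; omega

-- sorted(B, reverse=True) is sorted(B) read backwards (Int values: ties are identical)
theorem sorted_desc_eq_reverse (B : List Int) :
    PySem.List.sorted B (fun x => x) true = (PySem.List.sorted B (fun x => x)).reverse := by
  refine List.Perm.eq_of_pairwise (le := fun a b : Int => b ≤ a)
    (fun _ _ _ _ h1 h2 => le_antisymm h2 h1)
    (PySem.List.sorted_pairwise_rev B (fun x => x))
    ((List.pairwise_reverse).2 ?_)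
    (((PySem.List.sorted_perm ..).trans (PySem.List.sorted_perm ..).symm).trans
      (List.reverse_perm _).symm)
  have := PySem.List.sorted_pairwise B (fun x => x)
  exact this.imp (fun h => h)

-- a prefix of a list is characterised by its length and the predicate flipping there
theorem takeWhile_length_eq (P : Int → Bool) :
    ∀ (Bs : List Int) (q : Nat), q ≤ Bs.length →
      (∀ j (hj : j < Bs.length), j < q → P Bs[j]) →
      (∀ (hq : q < Bs.length), ¬ P Bs[q]) →
      (Bs.takeWhile P).length = q := by
  intro Bs
  induction Bs with
  | nil => intro q hq _ _; simpa using (Nat.le_zero.1 hq).symm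
  | cons b tl ih =>
    intro q hq h1 h2
    cases q with
    | zero =>
      have := h2 (by simp)
      simp at this
      simp [this]
    | succ q =>
      have hb : P b := h1 0 (by simp) (by omega)
      rw [List.takeWhile_cons_of_pos hb]
      simp only [List.length_cons]
      have := ih q (by simpa using hq)
        (fun j hj hjq => by simpa using h1 (j+1) (by simpa using hj) (by omega))
        (fun hlt => by simpa using h2 (by simpa using hlt))
      omega

-- on a sorted list, bisect_right is the length of the '≤ a' prefix
theorem bisect_eq_takeWhile (Bs : List Int) (a : Int) (h : Bs.Pairwise (· ≤ ·)) :
    PySem.List.bisectRight Bs a = (Bs.takeWhile (leB a)).length := by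
  obtain ⟨h0, h1, h2⟩ := PySem.List.bisectRight_spec Bs a h
  refine (takeWhile_length_eq (leB a) Bs _ h0
    (fun j hj hjq => by simpa [leB] using h1 j hj hjq)
    (fun hq => by simpa [leB] using not_le.2 (h2 _ hq (le_refl _)))).symm

-- takeWhile (≤ a) only looks inside the (≤ t) prefix, when a ≤ t
theorem takeWhile_le_chain (a t : Int) (ha : a ≤ t) (l : List Int) :
    l.takeWhile (leB a) = (l.takeWhile (leB t)).takeWhile (leB a) := by
  rw [List.takeWhile_takeWhile]
  congr 1
  funext b
  by_cases hb : b ≤ a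
  · simp [leB, hb]; omega
  · simp [leB, hb]

-- hence the (≤ a)-prefix is no longer than the (≤ t)-prefix
theorem takeWhile_le_len (a t : Int) (ha : a ≤ t) (l : List Int) :
    (l.takeWhile (leB a)).length ≤ (l.takeWhile (leB t)).length := by
  rw [takeWhile_le_chain a t ha]
  exact (List.takeWhile_sublist _).length_le

-- erasing at the bisect position commutes with taking the (≤ t)-prefix (a ≤ t):
-- the erased element is either inside that prefix or the first element beyond it
theorem erase_bisect (t a : Int) (ha : a ≤ t) (B : List Int) (hs : B.Pairwise (· ≤ ·)) :
    (B.eraseIdx (B.takeWhile (leB a)).length).takeWhile (leB t)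
      = (B.takeWhile (leB t)).eraseIdx (B.takeWhile (leB a)).length := by
  set p := (B.takeWhile (leB a)).length with hpdef
  set P := B.takeWhile (leB t) with hPdef
  set S := B.dropWhile (leB t) with hSdef
  have hdecomp : B = P ++ S := (List.takeWhile_append_dropWhile).symm
  have hple : p ≤ P.length := takeWhile_le_len a t ha B
  have hPmem : ∀ x ∈ P, leB t x := fun x hx => List.mem_takeWhile_imp hx
  have hSmem : ∀ x ∈ S, ¬ (leB t x = true) := by
    intro x hx
    have := dropWhile_gt t B hs x hx
    simp [leB]; omega
  rcases Nat.lt_or_ge p P.length with hlt | hge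
  · -- erase inside the prefix
    rw [hdecomp, List.eraseIdx_append_of_lt_length hlt, List.takeWhile_append]
    have hall : ∀ x ∈ P.eraseIdx p, leB t x = true :=
      fun x hx => hPmem x ((List.eraseIdx_sublist P p).mem hx)
    rw [if_pos]
    · rcases hS : S with _ | ⟨s, S'⟩
      · simp
      · rw [List.takeWhile_cons_of_neg (hSmem s (by rw [hS]; simp))]
        simp
    · exact congrArg List.length (List.takeWhile_eq_self_iff.2 hall)
  · -- p = P.length : erase the first element of the suffix
    have hpe : p = P.length := le_antisymm hple hge
    rw [hdecomp, List.eraseIdx_append_of_length_le (by omega), List.takeWhile_append]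
    rw [if_pos (congrArg List.length (List.takeWhile_eq_self_iff.2 hPmem))]
    have hSsub : (S.eraseIdx (p - P.length)).Sublist S := List.eraseIdx_sublist _ _
    rcases hS : S.eraseIdx (p - P.length) with _ | ⟨s, S'⟩
    · simp [List.eraseIdx_eq_self.2 (by omega : P.length ≤ p)]
    · rw [List.takeWhile_cons_of_neg (hSmem s ((hS ▸ hSsub).mem (by simp)))]
      simp [List.eraseIdx_eq_self.2 (by omega : P.length ≤ p)]

-- the invariant relating the two evolving B-states: same sorted '≤ t' prefix, same length
def BRel (t : Int) (B1 B2 : List Int) : Prop :=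
  B1.Pairwise (· ≤ ·) ∧ B2.Pairwise (· ≤ ·) ∧
  B1.takeWhile (leB t) = B2.takeWhile (leB t) ∧ B1.length = B2.length

-- A's loop gives the same count on BRel-related B-states, when every a ≤ t
theorem solGo_congr (A : List Int) (t : Int) :
    ∀ B1 B2 ans, (∀ x ∈ A, x ≤ t) → BRel t B1 B2 → solGo A B1 ans = solGo A B2 ans := by
  induction A with
  | nil => intro B1 B2 ans _ _; rfl
  | cons a rest ih =>
    intro B1 B2 ans hmem hrel
    obtain ⟨hs1, hs2, htw, hlen⟩ := hrel
    have ha : a ≤ t := hmem a (by simp)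
    have hrest : ∀ x ∈ rest, x ≤ t := fun x hx => hmem x (by simp [hx])
    have htwa : B1.takeWhile (leB a) = B2.takeWhile (leB a) := by
      rw [takeWhile_le_chain a t ha B1, takeWhile_le_chain a t ha B2, htw]
    simp only [solGo, bisect_eq_takeWhile B1 a hs1, bisect_eq_takeWhile B2 a hs2]
    by_cases hcond : (B1.takeWhile (leB a)).length < B1.length
    · have hcond2 : (B2.takeWhile (leB a)).length < B2.length := by
        rw [← htwa, ← hlen]; exact hcond
      rw [if_pos hcond, if_pos hcond2]
      apply ih _ _ _ hrest
      refine ⟨List.Pairwise.sublist (List.eraseIdx_sublist B1 _) hs1,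
              List.Pairwise.sublist (List.eraseIdx_sublist B2 _) hs2, ?_, ?_⟩
      · rw [erase_bisect t a ha B1 hs1, erase_bisect t a ha B2 hs2, htw, htwa]
      · rw [List.length_eraseIdx, List.length_eraseIdx, if_pos hcond, if_pos hcond2, hlen]
    · have hcond2 : ¬ (B2.takeWhile (leB a)).length < B2.length := by
        rw [← htwa, ← hlen]; exact hcond
      rw [if_neg hcond, if_neg hcond2]
      exact ih _ _ _ hrest ⟨hs1, hs2, htw, hlen⟩

-- main: on A sorted descending and B sorted ascending, A's bisect-and-delete loop
-- equals the two-pointer loop over B read backwards (i.e. descending)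
theorem main_lemma (A : List Int) :
    ∀ B ans, A.Pairwise (fun a b => b ≤ a) → B.Pairwise (· ≤ ·) →
      solGo A B ans = tpGo A B.reverse ans := by
  induction A with
  | nil => intro B ans _ _; rfl
  | cons a rest ih =>
    intro B ans hA hB
    have hrest : rest.Pairwise (fun a b => b ≤ a) := (List.pairwise_cons.1 hA).2
    have hale : ∀ x ∈ rest, x ≤ a := (List.pairwise_cons.1 hA).1
    rcases List.eq_nil_or_concat B with rfl | ⟨L, b, rfl⟩
    · simp only [solGo, bisect_eq_takeWhile [] a hB]
      simpa using ih [] ans hrest hB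
    · simp only [List.concat_eq_append] at hB ⊢
      have hLb : ∀ x ∈ L, x ≤ b := by
        intro x hx
        exact (List.pairwise_append.1 hB).2.2 x hx b (by simp)
      have hL : L.Pairwise (· ≤ ·) := (List.pairwise_append.1 hB).1
      rw [List.reverse_append, List.reverse_singleton]
      simp only [solGo, tpGo, List.singleton_append, bisect_eq_takeWhile (L ++ [b]) a hB]
      by_cases hab : a < b
      · -- the largest b beats a: A erases its bisect position, B consumes the head
        rw [if_pos hab]
        have hlt : ((L ++ [b]).takeWhile (leB a)).length < (L ++ [b]).length := by
          by_contra h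
          have h := Nat.le_of_not_lt h
          have heq : (L ++ [b]).takeWhile (leB a) = L ++ [b] :=
            (List.takeWhile_sublist _).eq_of_length
              (le_antisymm (List.takeWhile_sublist _).length_le h)
          have := List.takeWhile_eq_self_iff.1 heq b (by simp)
          simp [leB] at this
          omega
        rw [if_pos hlt]
        rw [← ih L (ans + 1) hrest hL]
        apply solGo_congr rest a _ _ _ hale
        have hbgta : ¬ (leB a b = true) := by simp [leB]; omega
        have htwL : (L ++ [b]).takeWhile (leB a) = L.takeWhile (leB a) := by
          rw [List.takeWhile_append]
          split_ifs with h
          · rw [List.takeWhile_cons_of_neg hbgta, List.append_nil]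
            exact ((List.Sublist.eq_of_length (List.takeWhile_sublist _) h)).symm
          · rfl
        refine ⟨List.Pairwise.sublist (List.eraseIdx_sublist _ _) hB, hL, ?_, ?_⟩
        · rw [erase_bisect a a (le_refl a) (L ++ [b]) hB]
          rw [List.eraseIdx_eq_self.2 (le_refl _), htwL]
        · rw [List.length_eraseIdx, if_pos hlt]; simp
      · -- even the largest b is ≤ a: nothing in B beats a, both loops skip a
        rw [if_neg hab]
        have hballe : ∀ x ∈ L ++ [b], leB a x = true := by
          intro x hx
          rcases List.mem_append.1 hx with hx | hx
          · have := hLb x hx; simp [leB]; omega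
          · simp at hx; subst hx; simp [leB]; omega
        have : (L ++ [b]).takeWhile (leB a) = L ++ [b] := List.takeWhile_eq_self_iff.2 hballe
        rw [this, if_neg (lt_irrefl _)]
        have := ih (L ++ [b]) ans hrest hB
        rw [List.reverse_append, List.reverse_singleton] at this
        exact this

-- ===== VERDICT (by name: the statement is the Claim_ definition above) =====
theorem solution_spec : Claim_equal_solution := by
  intro A B _
  unfold Spec_solution solution solution_alt
  rw [altLoop_eq_tpGo _ _ 0 0 (Nat.zero_le _), List.drop_zero, List.drop_zero,
    sorted_desc_eq_reverse B]
  exact main_lemma _ _ _ (PySem.List.sorted_pairwise_rev A (fun x => x))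
    (PySem.List.sorted_pairwise B (fun x => x))
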